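-- pv_equiv track=rewrite | github.com/zack37/sandbox | automate-the-boring-stuff/lecture_23.py | is_phone_number
-- ===== SOURCE A (Python) =====
-- def is_phone_number(text):
--     if len(text) != 12:
--         return False
--     for i in text[:3]:
--         if not i.isdecimal():
--             return False
--     if text[3] != '-':
--         return False
--     for i in text[4:7]:
--         if not i.isdecimal():
--             return False
--     if text[7] != '-':
--         return False
--     for i in text[8:]:
--         if not i.isdecimal():
--             return False
--
--     return True
-- ===== SOURCE B (Python) =====
-- def is_phone_number(text):
--     parts = text.split('-')
--     if len(parts) != 3:
--         return False
--     a, b, c = parts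
--     if len(a) != 3 or len(b) != 3 or len(c) != 4:
--         return False
--     return a.isdecimal() and b.isdecimal() and c.isdecimal()
-- ===== Notes on version B (the rewrite author's own statement) =====
-- stated objective: simpler
-- what changed: replaces positional index/slice scanning of a fixed-width layout by splitting on the dash separator followed by shape checks (three parts of lengths 3, 3 and 4, all decimal)
import Mathlib
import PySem

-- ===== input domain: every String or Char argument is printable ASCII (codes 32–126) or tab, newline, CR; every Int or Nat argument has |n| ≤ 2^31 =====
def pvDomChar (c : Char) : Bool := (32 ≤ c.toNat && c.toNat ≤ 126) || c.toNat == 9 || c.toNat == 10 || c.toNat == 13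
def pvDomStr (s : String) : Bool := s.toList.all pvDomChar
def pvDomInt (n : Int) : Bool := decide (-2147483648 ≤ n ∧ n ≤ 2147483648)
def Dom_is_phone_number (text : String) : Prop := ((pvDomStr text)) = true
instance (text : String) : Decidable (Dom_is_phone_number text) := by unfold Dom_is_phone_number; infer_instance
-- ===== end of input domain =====

-- B replaces A's positional index/slice scanning of a fixed-width layout by splitting on
-- the dash separator and checking the shape of the parts (three parts of lengths 3, 3, 4,
-- all decimal); objective: simpler.
-- (char.isdecimal()/str.isdecimal() are ported as PySem.Chars.isdigit/strIsdigit, exact on ASCII.)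

-- ===== PORT A =====
def is_phone_number (text : String) : Bool :=
  let cs := text.toList
  if cs.length ≠ 12 then false
  else if ¬ (PySem.Chars.slice cs none (some 3)).all PySem.Chars.isdigit then false
  else if PySem.List.pyGet? cs 3 ≠ some '-' then false
  else if ¬ (PySem.Chars.slice cs (some 4) (some 7)).all PySem.Chars.isdigit then false
  else if PySem.List.pyGet? cs 7 ≠ some '-' then false
  else if ¬ (PySem.Chars.slice cs (some 8) none).all PySem.Chars.isdigit then false
  else true

-- ===== PORT B =====
def is_phone_number_alt (text : String) : Bool :=
  match PySem.Chars.split? text.toList ['-'] with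
  | some [a, b, c] =>
      if a.length ≠ 3 ∨ b.length ≠ 3 ∨ c.length ≠ 4 then false
      else PySem.Chars.strIsdigit a && PySem.Chars.strIsdigit b && PySem.Chars.strIsdigit c
  | _ => false

-- ===== PRECONDITION & SPEC =====
def Spec_is_phone_number (text : String) (out : Bool) : Prop := out = is_phone_number_alt text
instance (text : String) (out : Bool) : Decidable (Spec_is_phone_number text out) := by unfold Spec_is_phone_number; infer_instance

-- ===== CLAIM (what is proved, stated in full; the proofs are below) =====
def Claim_equal_is_phone_number : Prop := ∀ (text : String), Dom_is_phone_number text → Spec_is_phone_number text (is_phone_number text)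

-- ===== LEMMAS AND PROOFS =====

-- a back-to-front recursive characterisation of splitting on a single char
def pvSp (d : Char) : List Char → List (List Char)
  | [] => [[]]
  | c :: rest => if c = d then [] :: pvSp d rest else (pvSp d rest).modifyHead (c :: ·)

lemma pvSp_ne_nil (d : Char) (cs : List Char) : pvSp d cs ≠ [] := by
  cases cs with
  | nil => simp [pvSp]
  | cons c rest =>
    simp only [pvSp]
    split_ifs
    · simp
    · cases h : pvSp d rest with
      | nil => exact absurd h (pvSp_ne_nil d rest)
      | cons x xs => simp

lemma pvGo_spec (d : Char) (cs : List Char) : ∀ (cur : List Char) (acc : List (List Char)) (fuel : Nat),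
    cs.length < fuel →
    PySem.Chars.splitOn.go [d] fuel cs cur acc
      = acc.reverse ++ (pvSp d cs).modifyHead (cur.reverse ++ ·) := by
  induction cs with
  | nil =>
    intro cur acc fuel hf
    match fuel, hf with
    | fuel + 1, _ => simp [PySem.Chars.splitOn.go, pvSp]
  | cons c rest ih =>
    intro cur acc fuel hf
    match fuel, hf with
    | fuel + 1, hf =>
      by_cases hcd : d = c
      · subst hcd
        rw [show PySem.Chars.splitOn.go [d] (fuel + 1) (d :: rest) cur acc
              = PySem.Chars.splitOn.go [d] fuel rest [] (cur.reverse :: acc) by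
            simp [PySem.Chars.splitOn.go, List.isPrefixOf]]
        rw [ih [] (cur.reverse :: acc) fuel (by simpa using hf)]
        cases h : pvSp d rest with
        | nil => exact absurd h (pvSp_ne_nil d rest)
        | cons x xs => simp [pvSp, h]
      · rw [show PySem.Chars.splitOn.go [d] (fuel + 1) (c :: rest) cur acc
              = PySem.Chars.splitOn.go [d] fuel rest (c :: cur) acc by
            simp [PySem.Chars.splitOn.go, List.isPrefixOf, hcd]]
        rw [ih (c :: cur) acc fuel (by simpa using hf)]
        cases h : pvSp d rest with
        | nil => exact absurd h (pvSp_ne_nil d rest)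
        | cons x xs => simp [pvSp, h, Ne.symm hcd]

lemma pvSplitOn_eq_sp (d : Char) (cs : List Char) :
    PySem.Chars.splitOn cs [d] = pvSp d cs := by
  rw [PySem.Chars.splitOn, pvGo_spec d cs [] [] (cs.length + 1) (by omega)]
  cases h : pvSp d cs with
  | nil => exact absurd h (pvSp_ne_nil d cs)
  | cons x xs => simp

-- glueing the parts back with the separator recovers the string
def pvGlue (d : Char) : List (List Char) → List Char
  | [] => []
  | [x] => x
  | x :: xs => x ++ d :: pvGlue d xs

lemma pvGlue_sp (d : Char) (cs : List Char) : pvGlue d (pvSp d cs) = cs := by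
  induction cs with
  | nil => simp [pvSp, pvGlue]
  | cons c rest ih =>
    simp only [pvSp]
    split_ifs with h
    · subst h
      cases hr : pvSp c rest with
      | nil => exact absurd hr (pvSp_ne_nil c rest)
      | cons x xs =>
        rw [hr] at ih
        cases xs <;> simp_all [pvGlue]
    · cases hr : pvSp d rest with
      | nil => exact absurd hr (pvSp_ne_nil d rest)
      | cons x xs =>
        rw [hr] at ih
        cases xs <;> simp_all [pvGlue]

lemma pvIsdigit_ne_dash {c : Char} (h : PySem.Chars.isdigit c = true) : c ≠ '-' := by
  rintro rfl; simp [PySem.Chars.isdigit] at h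


lemma pvSp_no_sep (d : Char) (a : List Char) (h : d ∉ a) : pvSp d a = [a] := by
  induction a with
  | nil => simp [pvSp]
  | cons c rest ih =>
    simp only [pvSp]
    rw [if_neg (by rintro rfl; simp at h), ih (by intro hm; exact h (List.mem_cons_of_mem _ hm))]
    simp

lemma pvSp_append (d : Char) (a rest : List Char) (h : d ∉ a) :
    pvSp d (a ++ d :: rest) = a :: pvSp d rest := by
  induction a with
  | nil => simp [pvSp]
  | cons c tl ih =>
    simp only [List.cons_append, pvSp]
    rw [if_neg (by rintro rfl; simp at h), ih (by intro hm; exact h (List.mem_cons_of_mem _ hm))]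
    cases hr : pvSp d rest with
    | nil => exact absurd hr (pvSp_ne_nil d rest)
    | cons x xs => simp

lemma pvAlt_eval (text : String) :
    is_phone_number_alt text =
      (match pvSp '-' text.toList with
       | [a, b, c] =>
          if a.length ≠ 3 ∨ b.length ≠ 3 ∨ c.length ≠ 4 then false
          else PySem.Chars.strIsdigit a && PySem.Chars.strIsdigit b && PySem.Chars.strIsdigit c
       | _ => false) := by
  rw [is_phone_number_alt]
  simp only [PySem.Chars.split?, List.isEmpty, pvSplitOn_eq_sp]
  simp only [Bool.false_eq_true, if_false]
  cases pvSp '-' text.toList with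
  | nil => rfl
  | cons a l => cases l with
    | nil => rfl
    | cons b l2 => cases l2 with
      | nil => rfl
      | cons c l3 => cases l3 <;> rfl

lemma pvSlice1 (cs : List Char) : PySem.Chars.slice cs none (some 3) = cs.take 3 := by
  simp [PySem.List.slice_to]

lemma pvSlice2 (cs : List Char) : PySem.Chars.slice cs (some 4) (some 7) = (cs.drop 4).take 3 := by
  have := PySem.List.slice_natCast cs 4 7
  simpa using this

lemma pvSlice3 (cs : List Char) : PySem.Chars.slice cs (some 8) none = cs.drop 8 := by
  simp [PySem.List.slice_from]

lemma pvL1 (text : String) (h : is_phone_number text = true) : is_phone_number_alt text = true := by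
  rw [is_phone_number] at h
  simp only [pvSlice1, pvSlice2, pvSlice3, PySem.List.pyGet?_ofNat'] at h
  split_ifs at h with h1 h2 h3 h4 h5 h6
  rw [not_ne_iff] at h1 h3 h5
  have e3 : text.toList[3]'(by omega) = '-' := by
    rw [List.getElem?_eq_getElem (by omega)] at h3
    exact Option.some.inj h3
  have e7 : text.toList[7]'(by omega) = '-' := by
    rw [List.getElem?_eq_getElem (by omega)] at h5
    exact Option.some.inj h5
  have la : (text.toList.take 3).length = 3 := by simp [h1]
  have lb : ((text.toList.drop 4).take 3).length = 3 := by simp [h1]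
  have lc : (text.toList.drop 8).length = 4 := by simp [h1]
  have na : '-' ∉ text.toList.take 3 := fun hm =>
    pvIsdigit_ne_dash (List.all_eq_true.mp h2 _ hm) rfl
  have nb : '-' ∉ (text.toList.drop 4).take 3 := fun hm =>
    pvIsdigit_ne_dash (List.all_eq_true.mp h4 _ hm) rfl
  have nc : '-' ∉ text.toList.drop 8 := fun hm =>
    pvIsdigit_ne_dash (List.all_eq_true.mp h6 _ hm) rfl
  have hdec : text.toList
      = text.toList.take 3 ++ '-' :: ((text.toList.drop 4).take 3 ++ '-' :: text.toList.drop 8) := by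
    conv_lhs => rw [← List.take_append_drop 3 text.toList]
    congr 1
    rw [List.drop_eq_getElem_cons (show 3 < text.toList.length by omega), e3]
    congr 1
    conv_lhs => rw [← List.take_append_drop 3 (text.toList.drop 4)]
    congr 1
    rw [List.drop_drop]
    rw [List.drop_eq_getElem_cons (show 3 + 4 < text.toList.length by omega)]
    simp only [show (3+4:Nat)=7 from rfl, show (3+4+1:Nat)=8 from rfl, e7]
  have hsp : pvSp '-' text.toList
      = [text.toList.take 3, (text.toList.drop 4).take 3, text.toList.drop 8] := by
    conv_lhs => rw [hdec]
    rw [pvSp_append _ _ _ na, pvSp_append _ _ _ nb, pvSp_no_sep _ _ nc]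
  have ne_a : text.toList.take 3 ≠ [] := by intro e; rw [e] at la; simp at la
  have ne_b : (text.toList.drop 4).take 3 ≠ [] := by intro e; rw [e] at lb; simp at lb
  have ne_c : text.toList.drop 8 ≠ [] := by intro e; rw [e] at lc; simp at lc
  rw [pvAlt_eval, hsp]
  simp [PySem.Chars.strIsdigit, la, lb, lc, h2, h4, h6, ne_a, ne_b, ne_c]

lemma pvL2 (text : String) (h : is_phone_number_alt text = true) : is_phone_number text = true := by
  rw [pvAlt_eval] at h
  cases hsp : pvSp '-' text.toList with
  | nil => rw [hsp] at h; simp at h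
  | cons a l =>
    cases l with
    | nil => rw [hsp] at h; simp at h
    | cons b l2 =>
      cases l2 with
      | nil => rw [hsp] at h; simp at h
      | cons c l3 =>
        cases l3 with
        | cons e rest => rw [hsp] at h; simp at h
        | nil =>
          rw [hsp] at h
          simp only [PySem.Chars.strIsdigit] at h
          split_ifs at h with hlens
          push Not at hlens
          obtain ⟨la, lb, lc⟩ := hlens
          simp at h
          obtain ⟨⟨⟨_, ha⟩, _, hb⟩, _, hc⟩ := h
          have hglue := pvGlue_sp '-' text.toList
          rw [hsp] at hglue
          simp only [pvGlue] at hglue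
          have t1 : (a ++ '-' :: (b ++ '-' :: c)).length = 12 := by simp [la, lb, lc]
          have t2 : (a ++ '-' :: (b ++ '-' :: c)).take 3 = a := List.take_left' la
          have t3 : (a ++ '-' :: (b ++ '-' :: c))[3]? = some '-' := by
            rw [List.getElem?_append_right (by omega), la]
            simp
          have hd4 : (a ++ '-' :: (b ++ '-' :: c)).drop 4 = b ++ '-' :: c := by
            rw [show a ++ '-' :: (b ++ '-' :: c) = (a ++ ['-']) ++ (b ++ '-' :: c) by simp]
            exact List.drop_left' (by simp [la])
          have t4 : ((a ++ '-' :: (b ++ '-' :: c)).drop 4).take 3 = b := by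
            rw [hd4]; exact List.take_left' lb
          have t5 : (a ++ '-' :: (b ++ '-' :: c))[7]? = some '-' := by
            rw [show (7:Nat) = 4 + 3 from rfl, ← List.getElem?_drop, hd4,
              List.getElem?_append_right (by omega), lb]
            simp
          have t6 : (a ++ '-' :: (b ++ '-' :: c)).drop 8 = c := by
            rw [show ((a ++ '-' :: (b ++ '-' :: c)).drop 8)
                  = (((a ++ '-' :: (b ++ '-' :: c)).drop 4).drop 4) by rw [List.drop_drop],
              hd4, show b ++ '-' :: c = (b ++ ['-']) ++ c by simp]
            exact List.drop_left' (by simp [lb])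
          rw [is_phone_number]
          simp only [pvSlice1, pvSlice2, pvSlice3, PySem.List.pyGet?_ofNat', ← hglue]
          simp [t1, t2, t4, t6, List.all_eq_true.mpr ha, List.all_eq_true.mpr hb, List.all_eq_true.mpr hc]
          exact ⟨Option.some.inj ((List.getElem?_eq_getElem (by rw [t1]; omega)).symm.trans t3),
                 Option.some.inj ((List.getElem?_eq_getElem (by rw [t1]; omega)).symm.trans t5)⟩

theorem is_phone_number_spec : Claim_equal_is_phone_number := by
  intro text _
  unfold Spec_is_phone_number
  cases hA : is_phone_number text with
  | true => exact (pvL1 text hA).symm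
  | false =>
    cases hB : is_phone_number_alt text with
    | true => rw [pvL2 text hB] at hA; exact absurd hA (by simp)
    | false => rfl
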